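-- pv_equiv track=rewrite | github.com/911samuel/SignLearn | backend/data/validate.py | check_subject_leakage
-- ===== SOURCE A (Python) =====
-- from collections import defaultdict
--
-- def check_subject_leakage(
--     data: dict[str, list],
-- ) -> list[str]:
--     """Return error messages for any subject_id that appears in more than one split."""
--     subject_splits: dict[int, set[str]] = defaultdict(set)
--     for split, entries in data.items():
--         for _, _, subject_id in entries:
--             subject_splits[subject_id].add(split)
--
--     errors = []
--     for subject_id, splits in sorted(subject_splits.items()):
--         if len(splits) > 1:
--             errors.append(
--                 f"LEAKAGE: subject s{subject_id:02d} appears in splits: {sorted(splits)}"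
--             )
--     return errors
-- ===== SOURCE B (Python) =====
-- def check_subject_leakage(data):
--     """Return error messages for any subject_id that appears in more than one split."""
--     ids = sorted({sid for entries in data.values() for _, _, sid in entries})
--     errors = []
--     for sid in ids:
--         splits = sorted({split for split, entries in data.items()
--                          if any(s == sid for _, _, s in entries)})
--         if len(splits) > 1:
--             errors.append(f"LEAKAGE: subject s{sid:02d} appears in splits: {splits}")
--     return errors
-- ===== Notes on version B (the rewrite author's own statement) =====
-- stated objective: alternative
-- what changed: Replaces the defaultdict(set) hash-grouping pass over all entries by first computing the sorted list of distinct subject ids and then, for each id, rescanning the splits to collect where it occurs; no per-subject dict is maintained.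
import Mathlib
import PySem

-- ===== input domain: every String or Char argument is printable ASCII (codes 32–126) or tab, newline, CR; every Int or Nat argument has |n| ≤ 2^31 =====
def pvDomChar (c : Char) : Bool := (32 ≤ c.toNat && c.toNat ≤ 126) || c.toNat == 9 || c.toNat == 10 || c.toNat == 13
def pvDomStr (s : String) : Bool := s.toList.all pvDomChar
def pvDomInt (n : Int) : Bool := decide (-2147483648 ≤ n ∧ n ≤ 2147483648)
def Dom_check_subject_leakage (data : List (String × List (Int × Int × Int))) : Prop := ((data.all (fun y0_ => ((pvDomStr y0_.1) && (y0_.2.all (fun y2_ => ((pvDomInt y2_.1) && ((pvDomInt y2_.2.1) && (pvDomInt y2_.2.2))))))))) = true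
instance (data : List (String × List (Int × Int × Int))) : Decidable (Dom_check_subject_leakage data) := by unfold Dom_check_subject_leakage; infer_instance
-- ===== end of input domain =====

-- B replaces A's defaultdict(set) hash-grouping by a sorted distinct-subject list with a
-- per-subject rescan of the splits (objective: alternative; same return value).

-- Shared f-string formatting helper (the identical message f-string of both Pythons):
-- Python repr of one string, exact on the domain's characters (printable ASCII, tab, newline, CR)
def pvReprChar (q : Char) (c : Char) : List Char :=
  if c = '\\' then ['\\', '\\']
  else if c = q then ['\\', q]
  else if c = Char.ofNat 9 then ['\\', 't']
  else if c = Char.ofNat 10 then ['\\', 'n']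
  else if c = Char.ofNat 13 then ['\\', 'r']
  else [c]

def pvReprStr (s : String) : String :=
  let cs := s.toList
  let q : Char := if '\'' ∈ cs ∧ ¬ ('"' ∈ cs) then '"' else '\''
  String.ofList ([q] ++ cs.flatMap (pvReprChar q) ++ [q])

-- f"LEAKAGE: subject s{sid:02d} appears in splits: {splits}" for an already-sorted list of splits
def pvMsg (sid : Int) (splits : List String) : String :=
  "LEAKAGE: subject s" ++ PySem.Str.zfill (PySem.Int.toStr sid) 2
    ++ " appears in splits: [" ++ PySem.Str.join ", " (splits.map pvReprStr) ++ "]"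

-- ===== PORT A =====
def check_subject_leakage (data : List (String × List (Int × Int × Int))) : List String :=
  let subject_splits : PySem.Dict Int (PySem.Set String) :=
    data.foldl (fun d sp =>
      sp.2.foldl (fun d e => d.modify e.2.2 PySem.Set.empty (fun s => PySem.Set.add s sp.1)) d)
      PySem.Dict.empty
  -- sorted(subject_splits.items()): dict keys are distinct ints, so Python's tuple comparison
  -- never reaches the set component; sorting by the key is exact here
  (PySem.List.sorted subject_splits.items (fun p => p.1) false).foldl
    (fun errors p =>
      if PySem.Set.len p.2 > 1 then
        errors ++ [pvMsg p.1 (PySem.List.sorted p.2 (fun x => x) false)]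
      else errors) []

-- ===== PORT B =====
def check_subject_leakage_alt (data : List (String × List (Int × Int × Int))) : List String :=
  let ids := PySem.List.sorted
    (PySem.Set.ofList (data.flatMap (fun sp => sp.2.map (fun e => e.2.2)))) (fun x => x) false
  ids.foldl (fun errors sid =>
    let splits := PySem.List.sorted
      (PySem.Set.ofList ((data.filter (fun sp => sp.2.any (fun e => e.2.2 == sid))).map (fun sp => sp.1)))
      (fun x => x) false
    if splits.length > 1 then errors ++ [pvMsg sid splits] else errors) []

-- ===== PRECONDITION & SPEC =====
def Spec_check_subject_leakage (data : List (String × List (Int × Int × Int))) (out : List String) : Prop := out = check_subject_leakage_alt data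
instance (data : List (String × List (Int × Int × Int))) (out : List String) : Decidable (Spec_check_subject_leakage data out) := by unfold Spec_check_subject_leakage; infer_instance

-- ===== CLAIM (what is proved, stated in full; the proofs are below) =====
def Claim_equal_check_subject_leakage : Prop := ∀ (data : List (String × List (Int × Int × Int))), Dom_check_subject_leakage data → Spec_check_subject_leakage data (check_subject_leakage data)

-- ===== LEMMAS AND PROOFS =====

-- the (subject_id, split) pairs A's nested loop visits, in order
def pvPairs (data : List (String × List (Int × Int × Int))) : List (Int × String) :=
  data.flatMap (fun sp => sp.2.map (fun e => (e.2.2, sp.1)))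

-- the grouping step of A's dict loop, as a function of one pair
def pvStep (d : PySem.Dict Int (PySem.Set String)) (q : Int × String) : PySem.Dict Int (PySem.Set String) :=
  d.modify q.1 PySem.Set.empty (fun s => PySem.Set.add s q.2)

theorem pv_fold_flatten (data : List (String × List (Int × Int × Int)))
    (d : PySem.Dict Int (PySem.Set String)) :
    data.foldl (fun d sp =>
      sp.2.foldl (fun d e => d.modify e.2.2 PySem.Set.empty (fun s => PySem.Set.add s sp.1)) d) d
    = (pvPairs data).foldl pvStep d := by
  induction data generalizing d with
  | nil => rfl
  | cons sp t ih =>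
      simp only [List.foldl_cons, pvPairs, List.flatMap_cons, List.foldl_append, ih, List.foldl_map]
      rfl

theorem pv_getD_fold (l : List (Int × String)) (d : PySem.Dict Int (PySem.Set String)) (k : Int) :
    (l.foldl pvStep d).getD k PySem.Set.empty
    = PySem.Set.update (d.getD k PySem.Set.empty) ((l.filter (fun q => q.1 == k)).map (fun q => q.2)) := by
  induction l generalizing d with
  | nil => rfl
  | cons q t ih =>
      simp only [List.foldl_cons, ih, List.filter_cons]
      by_cases h : q.1 = k
      · simp [pvStep, h, PySem.Set.update_cons]
      · have hb : (q.1 == k) = false := by simpa using h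
        simp [pvStep, PySem.Dict.getD_modify, hb, Ne.symm h]

theorem pv_keys_fold (l : List (Int × String)) :
    (l.foldl pvStep PySem.Dict.empty).keys = PySem.Set.ofList (l.map (fun q => q.1)) := by
  have := PySem.Dict.keys_foldl_modify_key l (fun q => q.1) PySem.Set.empty
    (fun _ q => fun s => PySem.Set.add s q.2) PySem.Dict.empty
  simpa [pvStep, PySem.Set.update_empty] using this

theorem pv_nodup_keys_fold (l : List (Int × String)) :
    (l.foldl pvStep PySem.Dict.empty).keys.Nodup := by
  have := PySem.Dict.nodup_keys_foldl_modify_key l (fun q => q.1) PySem.Set.empty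
    (fun _ q => fun s => PySem.Set.add s q.2) PySem.Dict.empty (by simp)
  simpa [pvStep] using this

-- the final dict's value at k, as a Python set literal
theorem pv_value_fold (l : List (Int × String)) (k : Int) :
    (l.foldl pvStep PySem.Dict.empty).getD k PySem.Set.empty
    = PySem.Set.ofList ((l.filter (fun q => q.1 == k)).map (fun q => q.2)) := by
  rw [pv_getD_fold]
  simp [PySem.Set.update_nil_left]

-- B's per-subject split set has the same members as A's dict value at that subject
theorem pv_splits_same_members (data : List (String × List (Int × Int × Int))) (k : Int) (x : String) :
    (x ∈ ((pvPairs data).filter (fun q => q.1 == k)).map (fun q => q.2))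
    ↔ (x ∈ (data.filter (fun sp => sp.2.any (fun e => e.2.2 == k))).map (fun sp => sp.1)) := by
  simp only [List.mem_map, List.mem_filter, pvPairs, List.mem_flatMap, List.any_eq_true, beq_iff_eq]
  constructor
  · rintro ⟨q, ⟨⟨sp, hsp, e, he1, he2⟩, hk⟩, hx⟩
    subst he2
    exact ⟨sp, ⟨hsp, ⟨e, he1, hk⟩⟩, hx⟩
  · rintro ⟨sp, ⟨hsp, e, he, hk⟩, hx⟩
    exact ⟨(e.2.2, sp.1), ⟨⟨sp, hsp, ⟨e, he, rfl⟩⟩, hk⟩, hx⟩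

-- hence the two sorted split lists coincide (both sets are Nodup)
theorem pv_sorted_splits_eq (data : List (String × List (Int × Int × Int))) (k : Int) :
    PySem.List.sorted
      ((pvPairs data).foldl pvStep PySem.Dict.empty |>.getD k PySem.Set.empty) (fun x => x) false
    = PySem.List.sorted
      (PySem.Set.ofList ((data.filter (fun sp => sp.2.any (fun e => e.2.2 == k))).map (fun sp => sp.1)))
      (fun x => x) false := by
  rw [pv_value_fold]
  apply PySem.List.sorted_eq_sorted_of_perm _ _ _ (fun a b h => h)
  rw [List.perm_ext_iff_of_nodup (PySem.Set.nodup_ofList _) (PySem.Set.nodup_ofList _)]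
  intro x
  simp only [PySem.Set.mem_ofList]
  exact pv_splits_same_members data k x

theorem pv_value_perm (data : List (String × List (Int × Int × Int))) (k : Int) :
    ((pvPairs data).foldl pvStep PySem.Dict.empty |>.getD k PySem.Set.empty).Perm
    (PySem.Set.ofList ((data.filter (fun sp => sp.2.any (fun e => e.2.2 == k))).map (fun sp => sp.1))) := by
  have h := pv_sorted_splits_eq data k
  have h1 := PySem.List.sorted_perm
    ((pvPairs data).foldl pvStep PySem.Dict.empty |>.getD k PySem.Set.empty) (fun x : String => x) false
  have h2 := PySem.List.sorted_perm
    (PySem.Set.ofList ((data.filter (fun sp => sp.2.any (fun e => e.2.2 == k))).map (fun sp => sp.1)))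
    (fun x : String => x) false
  exact (h1.symm.trans (h ▸ h2))

-- the ids both sides iterate coincide
theorem pv_ids_eq (data : List (String × List (Int × Int × Int))) :
    (pvPairs data).map (fun q => q.1) = data.flatMap (fun sp => sp.2.map (fun e => e.2.2)) := by
  simp [pvPairs, List.map_flatMap, Function.comp_def]

-- A's sorted items = the sorted distinct keys paired with their dict values
theorem pv_sorted_items (data : List (String × List (Int × Int × Int))) :
    PySem.List.sorted ((pvPairs data).foldl pvStep PySem.Dict.empty).items (fun p => p.1) false
    = (PySem.List.sorted ((pvPairs data).foldl pvStep PySem.Dict.empty).keys (fun x => x) false).map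
        (fun k => (k, ((pvPairs data).foldl pvStep PySem.Dict.empty).getD k PySem.Set.empty)) := by
  set d := (pvPairs data).foldl pvStep PySem.Dict.empty with hd
  apply PySem.List.sorted_eq_of_perm_of_pairwise_lt
  · have hperm : (PySem.List.sorted d.keys (fun x => x) false).Perm d.keys :=
      PySem.List.sorted_perm _ _ _
    have : d.items = d.keys.map (fun k => (k, d.getD k PySem.Set.empty)) :=
      PySem.Dict.items_eq_map_keys d (pv_nodup_keys_fold _) PySem.Set.empty
    rw [this]
    exact hperm.map _
  · have hlt : (PySem.List.sorted d.keys (fun x => x) false).Pairwise (· < ·) := by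
      rw [hd, pv_keys_fold]
      exact PySem.List.sorted_ofList_pairwise_lt _
    rw [List.pairwise_map]
    exact hlt

theorem check_subject_leakage_eq (data : List (String × List (Int × Int × Int))) :
    check_subject_leakage data = check_subject_leakage_alt data := by
  unfold check_subject_leakage check_subject_leakage_alt
  dsimp only []
  rw [pv_fold_flatten, pv_sorted_items, List.foldl_map, pv_keys_fold, pv_ids_eq]
  apply PySem.List.foldl_congr_mem'
  intro k _ errors
  have hsplits := pv_sorted_splits_eq data k
  simp only [hsplits, PySem.Set.len, (pv_value_perm data k).length_eq, PySem.List.length_sorted]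
  norm_cast

-- ===== VERDICT (by name: the statement is the Claim_ definition above) =====
theorem check_subject_leakage_spec : Claim_equal_check_subject_leakage := by
  intro data _
  unfold Spec_check_subject_leakage
  exact check_subject_leakage_eq data
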